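-- pv_equiv track=rewrite | github.com/SLAB-NLP/Doc-Structure-Parser | parser/filter_communities.py | split_to_ranges
-- ===== SOURCE A (Python) =====
-- def split_to_ranges(lst):
--     ranges = []
--     start = end = None
--     start_idx = end_idx = None
--
--     for idx, num in enumerate(lst):
--         if start is None:
--             start = num
--             end = num
--             start_idx = end_idx = idx
--         elif num == end + 1:
--             end = num
--             end_idx = idx
--         else:
--             ranges.append((start_idx, end_idx))
--             start = num
--             end = num
--             start_idx = end_idx = idx
--
--     # Append the last range
--     ranges.append((start_idx, end_idx))
--
--     return ranges
-- ===== SOURCE B (Python) =====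
-- def split_to_ranges(lst):
--     ranges = []
--     n = len(lst)
--     i = 0
--     while i < n:
--         j = i
--         while j + 1 < n and lst[j + 1] == lst[j] + 1:
--             j += 1
--         ranges.append((i, j))
--         i = j + 1
--     return ranges
-- ===== Notes on version B (the rewrite author's own statement) =====
-- stated objective: alternative
-- what changed: Replaces A's single enumerate pass carrying start/end value-and-index state through four loop variables with an index-based two-pointer scan: an inner loop extends each consecutive run to its end, the outer loop jumps to the next run start; no per-element state machine.
-- outside the precondition, e.g. on split_to_ranges([]): A returns [(None, None)], B returns []
import Mathlib
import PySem

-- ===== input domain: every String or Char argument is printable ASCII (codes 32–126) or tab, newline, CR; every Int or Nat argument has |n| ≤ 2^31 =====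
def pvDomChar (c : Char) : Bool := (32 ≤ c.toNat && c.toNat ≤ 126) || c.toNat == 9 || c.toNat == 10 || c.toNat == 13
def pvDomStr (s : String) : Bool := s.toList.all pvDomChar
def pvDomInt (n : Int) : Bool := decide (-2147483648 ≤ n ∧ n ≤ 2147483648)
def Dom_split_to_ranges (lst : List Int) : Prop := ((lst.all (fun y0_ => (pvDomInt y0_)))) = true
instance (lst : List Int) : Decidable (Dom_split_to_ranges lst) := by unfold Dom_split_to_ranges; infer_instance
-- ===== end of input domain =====

-- B replaces A's enumerate pass with loop-carried value/index state by an index two-pointer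
-- run scan (objective: alternative, same cost); return value only, neither mutates its input.

-- ===== PORT A =====
-- state: (ranges, none | some (start, end, start_idx, end_idx)); 'none' is Python's start is None
def aStep (s : List (Int × Int) × Option (Int × Int × Int × Int)) (p : Int × Int) :
    List (Int × Int) × Option (Int × Int × Int × Int) :=
  match s.2 with
  | none => (s.1, some (p.2, p.2, p.1, p.1))
  | some (start, e, si, ei) =>
      if p.2 = e + 1 then (s.1, some (start, p.2, si, p.1))
      else (s.1 ++ [(si, ei)], some (p.2, p.2, p.1, p.1))

def split_to_ranges (lst : List Int) : List (Int × Int) :=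
  let st := (PySem.List.enumerate lst 0).foldl aStep ([], none)
  match st.2 with
  | some (_, _, si, ei) => st.1 ++ [(si, ei)]
  | none => []  -- Python appends (None, None) here (empty lst); excluded by Pre_

-- ===== PORT B =====
-- inner while: extend the run starting at j to its last index
def runEnd (lst : List Int) (n j : Nat) : Nat :=
  if j + 1 < n ∧ lst.getD (j + 1) 0 = lst.getD j 0 + 1 then runEnd lst n (j + 1) else j
termination_by n - j

theorem runEnd_ge (lst : List Int) (n j : Nat) : j ≤ runEnd lst n j := by
  fun_induction runEnd <;> omega

-- outer while over run starts
def altGo (lst : List Int) (n i : Nat) (acc : List (Int × Int)) : List (Int × Int) :=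
  if _h : i < n then
    let j := runEnd lst n i
    altGo lst n (j + 1) (acc ++ [((i : Int), (j : Int))])
  else acc
termination_by n - i
decreasing_by have := runEnd_ge lst n i; omega

def split_to_ranges_alt (lst : List Int) : List (Int × Int) :=
  altGo lst lst.length 0 []

-- ===== PRECONDITION & SPEC =====
-- Pre_ excludes only the empty list, on which A returns [(None, None)], not a pair of ints.
def Pre_split_to_ranges (lst : List Int) : Prop := lst ≠ []
instance (lst : List Int) : Decidable (Pre_split_to_ranges lst) := by
  unfold Pre_split_to_ranges; infer_instance

def pvWitness_split_to_ranges : List Int := [1, 2, 4]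

def Spec_split_to_ranges (lst : List Int) (out : List (Int × Int)) : Prop := out = split_to_ranges_alt lst
instance (lst : List Int) (out : List (Int × Int)) : Decidable (Spec_split_to_ranges lst out) := by unfold Spec_split_to_ranges; infer_instance

-- ===== CLAIM (what is proved, stated in full; the proofs are below) =====
def Claim_equal_split_to_ranges : Prop := ∀ (lst : List Int), Dom_split_to_ranges lst → Pre_split_to_ranges lst → Spec_split_to_ranges lst (split_to_ranges lst)

-- ===== LEMMAS AND PROOFS =====

-- middle form both ports reduce to: runs of consecutive values, e = last value, ei = last index
def runsMid (si ei e : Int) : List Int → List (Int × Int)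
  | [] => [(si, ei)]
  | v :: l => if v = e + 1 then runsMid si (ei + 1) v l
              else (si, ei) :: runsMid (ei + 1) (ei + 1) v l

def aFin (st : List (Int × Int) × Option (Int × Int × Int × Int)) : List (Int × Int) :=
  match st.2 with
  | some (_, _, si, ei) => st.1 ++ [(si, ei)]
  | none => []

theorem aLoop_eq (l : List Int) : ∀ (ei : Int) (ranges : List (Int × Int)) (start e si : Int),
    aFin ((PySem.List.enumerate l (ei + 1)).foldl aStep (ranges, some (start, e, si, ei)))
      = ranges ++ runsMid si ei e l := by
  induction l with
  | nil => intro ei ranges start e si; simp [PySem.List.enumerate, aFin, runsMid]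
  | cons v l ih =>
    intro ei ranges start e si
    rw [PySem.List.enumerate_cons]
    by_cases hv : v = e + 1
    · simpa [List.foldl_cons, aStep, hv, runsMid, add_assoc] using ih (ei + 1) ranges start v si
    · have h2 := ih (ei + 1) (ranges ++ [(si, ei)]) v v (ei + 1)
      simp only [List.foldl_cons, aStep, if_neg hv, runsMid]
      rw [h2, List.append_assoc, List.singleton_append]

theorem runEnd_eq (lst : List Int) (n : Nat) (hn : n = lst.length) (j : Nat) :
    j < n → ∀ (si : Int),
    runsMid si (j : Int) (lst.getD j 0) (lst.drop (j + 1))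
      = (si, (runEnd lst n j : Int)) ::
        (if runEnd lst n j + 1 < n then
          runsMid ((runEnd lst n j + 1 : Nat) : Int) ((runEnd lst n j + 1 : Nat) : Int)
            (lst.getD (runEnd lst n j + 1) 0) (lst.drop (runEnd lst n j + 2))
         else []) := by
  fun_induction runEnd lst n j with
  | case1 j hcond ih =>
    intro hj si
    obtain ⟨hlt, hc⟩ := hcond
    have hdrop : lst.drop (j + 1) = lst.getD (j + 1) 0 :: lst.drop (j + 2) := by
      rw [List.getD_eq_getElem lst 0 (by omega), List.drop_eq_getElem_cons (by omega)]
    rw [hdrop, runsMid, if_pos hc]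
    have := ih hlt si
    rw [show ((j : Int) + 1) = ((j + 1 : Nat) : Int) by push_cast; ring]
    exact this
  | case2 j hcond =>
    intro hj si
    by_cases hlt : j + 1 < n
    · have hc : ¬ lst.getD (j + 1) 0 = lst.getD j 0 + 1 := fun h => hcond ⟨hlt, h⟩
      have hdrop : lst.drop (j + 1) = lst.getD (j + 1) 0 :: lst.drop (j + 2) := by
        rw [List.getD_eq_getElem lst 0 (by omega), List.drop_eq_getElem_cons (by omega)]
      rw [hdrop, runsMid, if_neg hc, if_pos hlt]
      push_cast
      ring_nf
    · have hdrop : lst.drop (j + 1) = [] := List.drop_eq_nil_of_le (by omega)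
      rw [hdrop, runsMid, if_neg hlt]

theorem altGo_eq (lst : List Int) (n : Nat) (hn : n = lst.length) (i : Nat) (acc : List (Int × Int)) :
    altGo lst n i acc
      = acc ++ (if i < n then runsMid (i : Int) (i : Int) (lst.getD i 0) (lst.drop (i + 1)) else []) := by
  fun_induction altGo lst n i acc with
  | case1 i acc h j ih =>
    rw [ih, if_pos h, runEnd_eq lst n hn i h (i : Int)]
    simp only [List.append_assoc, List.singleton_append]
    rfl
  | case2 i acc h =>
    rw [if_neg h, List.append_nil]

-- ===== VERDICT (by name: the statement is the Claim_ definition above) =====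
theorem split_to_ranges_spec : Claim_equal_split_to_ranges := by
  intro lst _ hpre
  unfold Spec_split_to_ranges
  cases lst with
  | nil => exact absurd rfl hpre
  | cons x l =>
    have hA : split_to_ranges (x :: l)
        = aFin ((PySem.List.enumerate (x :: l) 0).foldl aStep ([], none)) := rfl
    rw [hA, PySem.List.enumerate_cons, List.foldl_cons]
    have hstep : aStep ([], none) (0, x) = ([], some (x, x, 0, 0)) := rfl
    rw [hstep, show (0 : Int) + 1 = 0 + 1 from rfl, aLoop_eq l 0 [] x x 0]
    rw [split_to_ranges_alt, altGo_eq (x :: l) (x :: l).length rfl 0 []]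
    simp
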